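-- pv_equiv track=rewrite | github.com/ska-telescope/ska-sdp-continuum-imaging-pipeline | src/ska_sdp_cip/measurement_set.py | balanced_chunk_bounds
-- ===== SOURCE A (Python) =====
-- from typing import Iterator, Optional, Union
--
-- def balanced_chunk_sizes(n: int, k: int) -> Iterator[int]:
--     """
--     When dividing a population of size `n` into `k` chunks, returns the sizes
--     of the `k` chunks that are as balanced as possible.
--     """
--     if not n > 0:
--         raise ValueError("n must be > 0")
--     if not 0 < k <= n:
--         raise ValueError("k must be > 0 and <= n")
--
--     q = n // k
--     r = n % k
--     for _ in range(0, r):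
--         yield q + 1
--     for _ in range(r, k):
--         yield q
--
-- def balanced_chunk_bounds(
--     start: int, end: int, k: int
-- ) -> Iterator[tuple[int, int]]:
--     """
--     When dividing a range of indices between `start` and `end` into `k` chunks,
--     yield the start and end indices of the chunks so that their sizes are
--     as balanced as possible.
--     """
--     n = end - start
--     for size in balanced_chunk_sizes(n, k):
--         end = start + size
--         yield start, end
--         start = end
-- ===== SOURCE B (Python) =====
-- def balanced_chunk_bounds(start, end, k):
--     """Yield balanced chunk bounds via closed-form positions (no running accumulator)."""
--     n = end - start
--     if not n > 0:
--         raise ValueError("n must be > 0")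
--     if not 0 < k <= n:
--         raise ValueError("k must be > 0 and <= n")
--     q, r = divmod(n, k)
--     for i in range(k):
--         yield (start + i * q + min(i, r), start + (i + 1) * q + min(i + 1, r))
-- ===== Notes on version B (the rewrite author's own statement) =====
-- stated objective: simpler
-- what changed: B drops the chunk-size generator and the running-start accumulator: it computes each chunk's bounds directly from its index with the closed form (start + i*q + min(i,r), start + (i+1)*q + min(i+1,r)) in a single loop over range(k).
import Mathlib
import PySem

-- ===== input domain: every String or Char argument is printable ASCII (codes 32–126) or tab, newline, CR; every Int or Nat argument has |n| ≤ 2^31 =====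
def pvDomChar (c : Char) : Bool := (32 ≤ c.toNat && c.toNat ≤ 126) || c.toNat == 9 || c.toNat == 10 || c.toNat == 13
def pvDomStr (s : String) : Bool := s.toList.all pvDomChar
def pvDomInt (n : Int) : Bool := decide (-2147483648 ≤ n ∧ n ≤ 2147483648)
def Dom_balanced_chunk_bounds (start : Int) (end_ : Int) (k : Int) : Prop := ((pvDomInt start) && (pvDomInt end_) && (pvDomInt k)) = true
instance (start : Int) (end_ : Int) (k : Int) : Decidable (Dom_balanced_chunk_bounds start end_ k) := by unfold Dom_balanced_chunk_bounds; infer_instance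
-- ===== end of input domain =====

-- B changes the decomposition: instead of yielding chunk sizes and threading a running
-- start, it emits each chunk's bounds by a closed-form position formula (objective: simpler).
-- Both A and B are Python generators; equivalence is about the list of yielded pairs.

-- ===== PORT A =====
-- the loop 'for size in balanced_chunk_sizes(n, k): end = start + size; yield start, end; start = end'
def pvGoA (s : Int) : List Int → List (Int × Int)
  | [] => []
  | sz :: rest => (s, s + sz) :: pvGoA (s + sz) rest

def balanced_chunk_bounds (start : Int) (end_ : Int) (k : Int) : List (Int × Int) :=
  let n := end_ - start
  if ¬ n > 0 then []          -- Python: raise ValueError("n must be > 0"); excluded by Pre_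
  else if ¬ (0 < k ∧ k ≤ n) then []  -- Python: raise ValueError("k must be > 0 and <= n"); excluded by Pre_
  else
    let q := PySem.Int.floordiv n k
    let r := PySem.Int.mod n k
    -- balanced_chunk_sizes: r copies of q+1 (range(0,r)), then k-r copies of q (range(r,k))
    pvGoA start ((PySem.List.pyRange 0 r 1).map (fun _ => q + 1) ++
                 (PySem.List.pyRange r k 1).map (fun _ => q))

-- ===== PORT B =====
def balanced_chunk_bounds_alt (start : Int) (end_ : Int) (k : Int) : List (Int × Int) :=
  let n := end_ - start
  if ¬ n > 0 then []          -- Python: raise ValueError("n must be > 0"); excluded by Pre_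
  else if ¬ (0 < k ∧ k ≤ n) then []  -- Python: raise ValueError("k must be > 0 and <= n"); excluded by Pre_
  else
    let q := PySem.Int.floordiv n k
    let r := PySem.Int.mod n k
    (PySem.List.pyRange 0 k 1).map (fun i =>
      (start + i * q + min i r, start + (i + 1) * q + min (i + 1) r))

-- ===== PRECONDITION & SPEC =====
-- Pre_ excludes exactly the inputs where A (and B) raise ValueError on first iteration:
-- end - start ≤ 0, or k outside (0, end - start].
def Pre_balanced_chunk_bounds (start : Int) (end_ : Int) (k : Int) : Prop :=
  0 < end_ - start ∧ 0 < k ∧ k ≤ end_ - start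
instance (start : Int) (end_ : Int) (k : Int) : Decidable (Pre_balanced_chunk_bounds start end_ k) := by unfold Pre_balanced_chunk_bounds; infer_instance

def pvWitness_balanced_chunk_bounds : Int × Int × Int := (2, 9, 3)

def Spec_balanced_chunk_bounds (start : Int) (end_ : Int) (k : Int) (out : List (Int × Int)) : Prop := out = balanced_chunk_bounds_alt start end_ k
instance (start : Int) (end_ : Int) (k : Int) (out : List (Int × Int)) : Decidable (Spec_balanced_chunk_bounds start end_ k out) := by unfold Spec_balanced_chunk_bounds; infer_instance

-- ===== CLAIM (what is proved, stated in full; the proofs are below) =====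
def Claim_equal_balanced_chunk_bounds : Prop := ∀ (start : Int) (end_ : Int) (k : Int), Dom_balanced_chunk_bounds start end_ k → Pre_balanced_chunk_bounds start end_ k → Spec_balanced_chunk_bounds start end_ k (balanced_chunk_bounds start end_ k)

-- ===== LEMMAS AND PROOFS =====

lemma pvMapConstLen {A : Type} (l : List A) (c : Int) :
    l.map (fun _ => c) = List.replicate l.length c := by
  induction l with
  | nil => simp
  | cons x xs ih => simp [ih, List.replicate_succ]

-- A's accumulator loop over the replicated sizes equals the closed-form positions.
lemma pvGoA_eq (q : Int) (r j : Nat) : ∀ (s : Int),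
    pvGoA s (List.replicate r (q + 1) ++ List.replicate j q) =
    (List.range (r + j)).map (fun (i : Nat) =>
      (s + (i : Int) * q + min (i : Int) (r : Int),
       s + ((i : Int) + 1) * q + min ((i : Int) + 1) (r : Int))) := by
  induction r with
  | zero =>
    induction j with
    | zero => intro s; simp [pvGoA]
    | succ j ih =>
      intro s
      rw [show 0 + (j + 1) = (0 + j) + 1 from rfl, List.range_succ_eq_map, List.map_cons,
          List.map_map]
      simp only [List.replicate_succ, List.replicate_zero, List.nil_append, pvGoA]
      have ih' := ih (s + q)
      simp only [List.replicate_zero, List.nil_append] at ih'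
      rw [ih']
      congr 1
      · simp only [Prod.mk.injEq]
        push_cast
        constructor
        · rw [show min (0 : Int) 0 = 0 by omega]; ring
        · rw [show min (1 : Int) 0 = 0 by omega]; ring
      · apply List.map_congr_left
        intro i _
        simp only [Function.comp, Nat.succ_eq_add_one, Prod.mk.injEq]
        push_cast
        constructor
        · rw [show min ((i : Int)) (0 : Int) = 0 by omega,
             show min ((i : Int) + 1) (0 : Int) = 0 by omega]; ring
        · rw [show min ((i : Int) + 1) (0 : Int) = 0 by omega,
             show min ((i : Int) + 1 + 1) (0 : Int) = 0 by omega]; ring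
  | succ r ih =>
    intro s
    rw [show r + 1 + j = (r + j) + 1 by omega, List.range_succ_eq_map, List.map_cons,
        List.map_map]
    simp only [List.replicate_succ, List.cons_append, pvGoA]
    rw [ih (s + (q + 1))]
    congr 1
    · simp only [Prod.mk.injEq]
      push_cast
      constructor
      · rw [show min (0 : Int) ((r : Int) + 1) = 0 by omega]; ring
      · rw [show min (1 : Int) ((r : Int) + 1) = 1 by omega]; ring
    · apply List.map_congr_left
      intro i _
      simp only [Function.comp, Nat.succ_eq_add_one, Prod.mk.injEq]
      push_cast
      constructor
      · rw [show min ((i : Int) + 1) ((r : Int) + 1) = min (i : Int) (r : Int) + 1 by omega]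
        generalize min (i : Int) (r : Int) = m; ring
      · rw [show min ((i : Int) + 1 + 1) ((r : Int) + 1) = min ((i : Int) + 1) (r : Int) + 1 by omega]
        generalize min ((i : Int) + 1) (r : Int) = m; ring

-- ===== VERDICT (by name: the statement is the Claim_ definition above) =====
theorem balanced_chunk_bounds_spec : Claim_equal_balanced_chunk_bounds := by
  intro start end_ k _ hpre
  obtain ⟨hn, hk, hkn⟩ := hpre
  unfold Spec_balanced_chunk_bounds
  simp only [balanced_chunk_bounds, balanced_chunk_bounds_alt]
  rw [if_neg (by omega), if_neg (by omega), if_neg (by omega), if_neg (by omega)]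
  have hr0 : 0 ≤ PySem.Int.mod (end_ - start) k := PySem.Int.mod_nonneg (end_ - start) hk
  have hrk : PySem.Int.mod (end_ - start) k < k := PySem.Int.mod_lt (end_ - start) hk
  generalize PySem.Int.mod (end_ - start) k = r at hr0 hrk
  generalize PySem.Int.floordiv (end_ - start) k = q
  rw [PySem.List.pyRange_one 0 r, PySem.List.pyRange_one r k, PySem.List.pyRange_one 0 k,
      pvMapConstLen, pvMapConstLen, List.length_map, List.length_range,
      List.length_map, List.length_range, pvGoA_eq, List.map_map,
      show (r - 0).toNat + (k - r).toNat = (k - 0).toNat by omega]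
  apply List.map_congr_left
  intro i _
  have hcast : ((r.toNat : Int)) = r := by omega
  simp [hcast]
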